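-- pv_equiv track=rewrite | github.com/grinlensCY/sw-aws_lambda_py | statistics.py | cal_sum_bs
-- ===== SOURCE A (Python) =====
-- def cal_sum_bs(data_list):
--     len_list=len(data_list)
--     if(len_list==0):
--         return 0;
--
--     sum_v=0
--     pre_cl=-1
--
--     for v_cl_pkg in data_list:
--         v,cl=v_cl_pkg
--         if(cl != pre_cl):
--             sum_v+=v
--             pre_cl=cl
--
--     return sum_v
-- ===== SOURCE B (Python) =====
-- def cal_sum_bs(data_list):
--     # Group the data (behind a class -1 sentinel) into maximal runs of equal
--     # class, then sum the first value of every run after the sentinel's run.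
--     xs = [(0, -1)] + list(data_list)
--     runs = []
--     for p in xs:
--         if runs and runs[-1][-1][1] == p[1]:
--             runs[-1].append(p)
--         else:
--             runs.append([p])
--     total = 0
--     for run in runs[1:]:
--         v, cl = run[0]
--         total += v
--     return total
-- ===== Notes on version B (the rewrite author's own statement) =====
-- stated objective: alternative
-- what changed: Replaces A's element-by-element adjacent-class comparison with a run-grouping pass: a class -1 sentinel is prepended, the list is split into maximal runs of equal class, and the first value of every run after the sentinel's run is summed.
import Mathlib
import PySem

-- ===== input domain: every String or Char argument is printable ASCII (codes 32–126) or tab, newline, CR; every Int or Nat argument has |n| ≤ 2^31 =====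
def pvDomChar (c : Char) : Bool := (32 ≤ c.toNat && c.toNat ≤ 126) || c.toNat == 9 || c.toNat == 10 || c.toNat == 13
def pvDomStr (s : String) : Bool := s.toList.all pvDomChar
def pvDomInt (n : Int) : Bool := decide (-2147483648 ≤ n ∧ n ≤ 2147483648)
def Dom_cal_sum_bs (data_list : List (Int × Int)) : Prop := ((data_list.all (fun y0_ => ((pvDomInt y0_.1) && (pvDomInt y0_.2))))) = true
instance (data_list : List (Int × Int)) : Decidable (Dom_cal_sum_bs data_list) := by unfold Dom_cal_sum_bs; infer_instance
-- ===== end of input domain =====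

-- B replaces A's adjacent-class comparison loop by a run-grouping pass behind a class -1 sentinel (alternative decomposition, same cost).


-- ===== PORT A =====
-- literal transliteration of A: early return on empty list, then one fold carrying (sum_v, pre_cl)
def cal_sum_bs (data_list : List (Int × Int)) : Int :=
  if data_list.length == 0 then 0
  else
    (data_list.foldl
      (fun (st : Int × Int) (p : Int × Int) =>
        if p.2 ≠ st.2 then (st.1 + p.1, p.2) else st)
      (0, -1)).1

-- ===== PORT B =====
-- B's grouping loop: split into maximal runs of equal class (left to right)
def splitRuns : List (Int × Int) → List (List (Int × Int))
  | [] => []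
  | x :: xs =>
      match splitRuns xs with
      | [] => [[x]]
      | (y :: ys) :: rest =>
          if x.2 == y.2 then (x :: y :: ys) :: rest else [x] :: (y :: ys) :: rest
      | [] :: rest => [x] :: rest   -- unreachable: runs are never empty

-- runs are never empty, so `run[0]` is ported with headD (the default is never used)
def cal_sum_bs_alt (data_list : List (Int × Int)) : Int :=
  ((splitRuns (((0 : Int), (-1 : Int)) :: data_list)).tail).foldl
    (fun s run => s + (run.headD (0, 0)).1) 0

-- ===== PRECONDITION & SPEC =====
def Spec_cal_sum_bs (data_list : List (Int × Int)) (out : Int) : Prop := out = cal_sum_bs_alt data_list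
instance (data_list : List (Int × Int)) (out : Int) : Decidable (Spec_cal_sum_bs data_list out) := by unfold Spec_cal_sum_bs; infer_instance

-- ===== CLAIM (what is proved, stated in full; the proofs are below) =====
def Claim_equal_cal_sum_bs : Prop := ∀ (data_list : List (Int × Int)), Dom_cal_sum_bs data_list → Spec_cal_sum_bs data_list (cal_sum_bs data_list)

-- ===== LEMMAS AND PROOFS =====

-- reference function: sum of values whose class differs from the previous one, seeded with `pre`
def gsum : Int → List (Int × Int) → Int
  | _, [] => 0
  | pre, (v, c) :: t => if c ≠ pre then v + gsum c t else gsum pre t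

def sumHeads (l : List (List (Int × Int))) : Int :=
  (l.map (fun run => (run.headD ((0 : Int), (0 : Int))).1)).sum

lemma splitRuns_cons_eq (xs : List (Int × Int)) : ∀ (x : Int × Int),
    splitRuns (x :: xs) =
      (x :: xs.takeWhile (fun p => p.2 == x.2)) :: splitRuns (xs.dropWhile (fun p => p.2 == x.2)) := by
  induction xs with
  | nil => intro x; simp [splitRuns]
  | cons y t ih =>
      intro x
      rw [splitRuns, ih y]
      by_cases h : x.2 = y.2
      · simp [List.takeWhile_cons, List.dropWhile_cons, h]
      · simp [List.takeWhile_cons, List.dropWhile_cons, h]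
        refine ⟨fun heq => h heq.symm, ?_⟩
        rw [if_neg (fun heq => h heq.symm), ih y]

lemma foldA (xs : List (Int × Int)) : ∀ (s pre : Int),
    (xs.foldl (fun (st : Int × Int) (p : Int × Int) =>
        if p.2 ≠ st.2 then (st.1 + p.1, p.2) else st) (s, pre)).1 = s + gsum pre xs := by
  induction xs with
  | nil => intro s pre; simp [gsum]
  | cons x t ih =>
      intro s pre
      obtain ⟨v, c⟩ := x
      rw [List.foldl_cons]
      dsimp only
      by_cases h : c = pre
      · rw [if_neg (by simp [h]), ih, gsum]
        simp [h]
      · rw [if_pos (by simp [h]), ih, gsum]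
        simp only [if_pos (show c ≠ pre from h)]
        ring

lemma foldSum (l : List (List (Int × Int))) : ∀ (s : Int),
    l.foldl (fun s run => s + (run.headD (0, 0)).1) s = s + sumHeads l := by
  induction l with
  | nil => intro s; simp [sumHeads]
  | cons r t ih =>
      intro s
      rw [List.foldl_cons, ih]
      simp [sumHeads]
      ring

lemma gsum_dropWhile (xs : List (Int × Int)) : ∀ (c : Int),
    gsum c (xs.dropWhile (fun p => p.2 == c)) = gsum c xs := by
  induction xs with
  | nil => intro c; simp
  | cons x t ih =>
      intro c
      obtain ⟨v, b⟩ := x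
      by_cases h : b = c
      · simp [List.dropWhile_cons, h, gsum, ih]
      · simp [List.dropWhile_cons, h, gsum]

lemma dropWhile_head_ne (xs : List (Int × Int)) (c v : Int) :
    (xs.dropWhile (fun p => p.2 == c)).head? ≠ some (v, c) := by
  induction xs with
  | nil => simp
  | cons x t ih =>
      obtain ⟨a, b⟩ := x
      by_cases h : b = c
      · simpa [List.dropWhile_cons, h] using ih
      · simp [List.dropWhile_cons, h]

lemma sumHeads_splitRuns : ∀ (n : Nat) (xs : List (Int × Int)) (c : Int), xs.length ≤ n →
    (∀ v, xs.head? ≠ some (v, c)) → sumHeads (splitRuns xs) = gsum c xs := by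
  intro n
  induction n with
  | zero =>
      intro xs c hlen _
      have : xs = [] := List.length_eq_zero_iff.mp (Nat.le_zero.mp hlen)
      subst this; simp [splitRuns, sumHeads, gsum]
  | succ n ih =>
      intro xs c hlen hhead
      cases xs with
      | nil => simp [splitRuns, sumHeads, gsum]
      | cons x t =>
          obtain ⟨v0, c0⟩ := x
          have hc : c0 ≠ c := by
            intro h; exact hhead v0 (by simp [h])
          have hdw : (t.dropWhile (fun p => p.2 == c0)).length ≤ n := by
            have := t.length_dropWhile_le (fun p => p.2 == c0)
            have ht : t.length ≤ n := by simpa using Nat.lt_succ_iff.mp (Nat.lt_of_lt_of_le (by simp) hlen)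
            omega
          have hrec := ih (t.dropWhile (fun p => p.2 == c0)) c0 hdw
            (fun v => dropWhile_head_ne t c0 v)
          rw [splitRuns_cons_eq]
          simp only [sumHeads, List.map_cons, List.sum_cons, List.headD_cons]
          have : sumHeads (splitRuns (t.dropWhile (fun p => p.2 == c0))) = gsum c0 t := by
            rw [hrec, gsum_dropWhile]
          simp only [sumHeads] at this
          rw [this]
          simp [gsum, hc]

lemma alt_eq_gsum (data_list : List (Int × Int)) :
    cal_sum_bs_alt data_list = gsum (-1) data_list := by
  unfold cal_sum_bs_alt
  rw [splitRuns_cons_eq]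
  simp only [List.tail_cons]
  rw [foldSum]
  rw [sumHeads_splitRuns (data_list.dropWhile (fun p => p.2 == (-1 : Int))).length _ (-1)
      (le_refl _) (fun v => dropWhile_head_ne data_list (-1) v)]
  simp [gsum_dropWhile]

-- ===== VERDICT (by name: the statement is the Claim_ definition above) =====
theorem cal_sum_bs_spec : Claim_equal_cal_sum_bs := by
  intro data_list _
  unfold Spec_cal_sum_bs
  rw [alt_eq_gsum]
  unfold cal_sum_bs
  cases data_list with
  | nil => simp [gsum]
  | cons x t =>
      have h0 : ((x :: t).length == 0) = false := by simp
      rw [h0]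
      simp only [Bool.false_eq_true, if_false]
      rw [foldA]
      omega
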